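-- pv_equiv track=rewrite | github.com/Matthew-J-Walsh/Short-Axiom-Searching | PolishFormUtilities.py | split_along_value
-- ===== SOURCE A (Python) =====
-- def split_along_value(polish, arity={"C": 2, "K": 2, "D": 2, "N": 1}):
--     """
--     Splits the polish formula along the n-arry function.
--     This is equivalent to getting the input parts of the top-most
--     function in left to right order.
--     Temporarily doesn't work with non-default arity parameters.
--
--     Parameters:
--     polish: polish formula to split
--     arity: arity of the functions used
--
--     Returns:
--     Tuple of the polish formula of the split
--     """
--     literals = -1
--     split_count = -1 * arity[polish[0]] + 1
--     last_split = 1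
--     splits = []
--     if split_count==0: #special case
--         return tuple([polish[1:]]) #?? why do i need to do this?
--
--     for i in range(1, len(polish)):
--         if polish[i] in arity.keys():
--             literals -= arity[polish[i]] - 1 #We only add (arity - 1) needed literals,
--                                              #best example is classical negation, we don't add any literals
--                                              #as it just needs 1 that we already are waiting for
--         else:
--             literals += 1
--
--         if literals==0:
--             splits.append(polish[last_split:i+1])
--             last_split = i+1
--             literals = -1
--             split_count += 1
--             if split_count==0:
--                 splits.append(polish[last_split:])
--                 return tuple(splits)
--
--     raise ValueError("Error \"split_along_value\" fell off the polish string.\nParameters:\n"+polish+"\n"+str(arity))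
-- ===== SOURCE B (Python) =====
-- def split_along_value(polish, arity={"C": 2, "K": 2, "D": 2, "N": 1}):
--     def read_one(start):
--         # scan one complete prefix subexpression starting at `start`,
--         # return the index just past it
--         need = 1
--         i = start
--         while need != 0:
--             need += arity.get(polish[i], 0) - 1
--             i += 1
--         return i
--     a = arity[polish[0]]
--     parts = []
--     idx = 1
--     for _ in range(a - 1):
--         end = read_one(idx)
--         parts.append(polish[idx:end])
--         idx = end
--     parts.append(polish[idx:])
--     return tuple(parts)
-- ===== Notes on version B (the rewrite author's own statement) =====
-- stated objective: simpler
-- what changed: A's single flat scan with a reset literal-counter, split-count bookkeeping and a special-cased unary top is replaced by a per-argument helper read_one that scans one complete prefix subexpression at a time, called a-1 times, with the unvalidated tail appended as the last argument.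
-- outside the precondition, e.g. on split_along_value('CZC', {'C': 2, 'Z': -1}): A returns ('ZC', ''), B returns ('ZC', '')
import Mathlib
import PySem

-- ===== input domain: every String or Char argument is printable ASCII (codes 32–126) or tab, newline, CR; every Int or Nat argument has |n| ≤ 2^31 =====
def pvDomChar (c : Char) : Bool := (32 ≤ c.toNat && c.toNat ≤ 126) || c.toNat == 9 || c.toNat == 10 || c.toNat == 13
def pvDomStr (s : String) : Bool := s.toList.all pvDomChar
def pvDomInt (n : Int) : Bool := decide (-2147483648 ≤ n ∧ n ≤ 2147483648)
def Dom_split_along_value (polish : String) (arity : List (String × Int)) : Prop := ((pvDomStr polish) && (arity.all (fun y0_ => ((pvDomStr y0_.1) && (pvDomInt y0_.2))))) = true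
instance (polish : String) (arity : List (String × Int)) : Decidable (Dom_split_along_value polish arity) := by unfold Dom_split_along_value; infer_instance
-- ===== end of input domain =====

-- B replaces A's single flat scan with running reset-counter, split bookkeeping and
-- special-cased unary top by a per-argument helper read_one sliced out a-1 times (objective: simpler).

-- ===== PORT A =====
-- the key polish[i] is a one-character string
def pvKey (c : Char) : String := String.ofList [c]

-- A's `for i in range(1, len(polish))` loop with its four state variables and early return;
-- the raising exits (falling off the string = ValueError) return [] (junk; excluded by Pre_).
-- Slices polish[last_split:i+1] / polish[last_split:] have Nat bounds ≤ length here, so they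
-- are exactly drop/take (PySem.List.slice_natCast / slice_from_natCast).
def pvALoop (cs : List Char) (ar : PySem.Dict String Int) (i : Nat) (literals : Int)
    (last_split : Nat) (splits : List String) (split_count : Int) : List String :=
  if h : i < cs.length then
    let literals' :=
      if ar.contains (pvKey cs[i]) then literals - (ar.getD (pvKey cs[i]) 0 - 1)
      else literals + 1
    if literals' = 0 then
      let splits' := splits ++ [String.ofList ((cs.drop last_split).take (i + 1 - last_split))]
      if split_count + 1 = 0 then splits' ++ [String.ofList (cs.drop (i + 1))]
      else pvALoop cs ar (i + 1) (-1) (i + 1) splits' (split_count + 1)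
    else pvALoop cs ar (i + 1) literals' last_split splits split_count
  else []
termination_by cs.length - i

def split_along_value (polish : String) (arity : List (String × Int)) : List String :=
  match PySem.List.pyGet? polish.toList 0 with
  | none => []                       -- polish[0] : IndexError (excluded by Pre_)
  | some c =>
    match (PySem.Dict.mk arity).get? (pvKey c) with
    | none => []                     -- arity[polish[0]] : KeyError (excluded by Pre_)
    | some a =>
      if -1 * a + 1 = 0 then [String.ofList (polish.toList.drop 1)]   -- special case, tuple([polish[1:]])
      else pvALoop polish.toList (PySem.Dict.mk arity) 1 (-1) 1 [] (-1 * a + 1)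

-- ===== PORT B =====
-- read_one(start): scan one complete prefix subexpression, return the index just past it;
-- none = IndexError (polish[i] past the end; excluded by Pre_).
def pvReadOne (cs : List Char) (ar : PySem.Dict String Int) (i : Nat) (need : Int) : Option Nat :=
  if need = 0 then some i
  else
    if h : i < cs.length then pvReadOne cs ar (i + 1) (need + (ar.getD (pvKey cs[i]) 0 - 1))
    else none
termination_by cs.length - i

-- `for _ in range(a-1)` slicing out one argument per iteration, then the tail
def pvBLoop (cs : List Char) (ar : PySem.Dict String Int) :
    Nat → Nat → List String → List String
  | 0, idx, parts => parts ++ [String.ofList (cs.drop idx)]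
  | k + 1, idx, parts =>
    match pvReadOne cs ar idx 1 with
    | none => []                     -- IndexError (excluded by Pre_)
    | some e => pvBLoop cs ar k e (parts ++ [String.ofList ((cs.drop idx).take (e - idx))])

def split_along_value_alt (polish : String) (arity : List (String × Int)) : List String :=
  match PySem.List.pyGet? polish.toList 0 with
  | none => []
  | some c =>
    match (PySem.Dict.mk arity).get? (pvKey c) with
    | none => []
    | some a => pvBLoop polish.toList (PySem.Dict.mk arity) (a - 1).toNat 1 []

-- ===== PRECONDITION & SPEC =====
-- Pre_ = A returns normally: the string is nonempty, its first symbol has a recorded arity a ≥ 1,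
-- and (unless a = 1) the running need-count over the tail completes the first a-1 arguments
-- before the string ends (a prefix-sum of arities-minus-one reaching 1-a).
-- Stated narrowing: when a ≥ 2 it also requires every scanned symbol's arity to be nonnegative —
-- a rare negative-arity symbol before the completion point can still let A return (see the cite
-- in the claim); the prefix-sum characterisation of A's ValueError is only exact without them.
-- the top arity is 1, or a prefix of the tail completes the first a-1 arguments:
-- its running sum of (arity-or-0 minus 1) reaches 1-a (exact for nonnegative arities)
def pvPreArgs (ar : PySem.Dict String Int) (a : Int) (t : List Char) : Bool :=
  a == 1 ||
    (decide (2 ≤ a) &&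
      (List.range t.length).any (fun i =>
        (t.take (i + 1)).all (fun c' => decide (0 ≤ ar.getD (pvKey c') 0)) &&
          ((t.take (i + 1)).map (fun c' => ar.getD (pvKey c') 0 - 1)).sum == 1 - a))

def pvPreB (polish : String) (arity : List (String × Int)) : Bool :=
  match polish.toList with
  | [] => false
  | c :: t =>
    match (PySem.Dict.mk arity).get? (pvKey c) with
    | none => false
    | some a => pvPreArgs (PySem.Dict.mk arity) a t

def Pre_split_along_value (polish : String) (arity : List (String × Int)) : Prop :=
  pvPreB polish arity = true
instance (polish : String) (arity : List (String × Int)) : Decidable (Pre_split_along_value polish arity) := by unfold Pre_split_along_value; infer_instance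

def pvWitness_split_along_value : String × (List (String × Int)) :=
  ("CNpq", [("C", 2), ("K", 2), ("D", 2), ("N", 1)])

def Spec_split_along_value (polish : String) (arity : List (String × Int)) (out : List String) : Prop := out = split_along_value_alt polish arity
instance (polish : String) (arity : List (String × Int)) (out : List String) : Decidable (Spec_split_along_value polish arity out) := by unfold Spec_split_along_value; infer_instance

-- ===== CLAIM (what is proved, stated in full; the proofs are below) =====
def Claim_equal_split_along_value : Prop := ∀ (polish : String) (arity : List (String × Int)), Dom_split_along_value polish arity → Pre_split_along_value polish arity → Spec_split_along_value polish arity (split_along_value polish arity)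

-- ===== LEMMAS AND PROOFS =====

-- A's per-character update equals B's: `in keys` + getD collapses to the plain getD step
lemma pvStep_eq (ar : PySem.Dict String Int) (k : String) (lit : Int) :
    (if ar.contains k then lit - (ar.getD k 0 - 1) else lit + 1) = lit - (ar.getD k 0 - 1) := by
  by_cases h : ar.contains k
  · simp [h]
  · have hn : ar.get? k = none := by
      rw [PySem.Dict.get?_eq_none_iff_contains]; simpa using h
    simp [h, PySem.Dict.getD, hn]

-- A's flat scan up to the next completion IS read_one: literals = -need throughout
lemma pvALoop_readOne (cs : List Char) (ar : PySem.Dict String Int) :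
    ∀ (n i : Nat) (lit : Int) (last : Nat) (splits : List String) (sc : Int),
      cs.length - i ≤ n → lit ≠ 0 →
      pvALoop cs ar i lit last splits sc =
        (match pvReadOne cs ar i (-lit) with
         | none => []
         | some e =>
           if sc + 1 = 0 then
             (splits ++ [String.ofList ((cs.drop last).take (e - last))]) ++
               [String.ofList (cs.drop e)]
           else
             pvALoop cs ar e (-1) e
               (splits ++ [String.ofList ((cs.drop last).take (e - last))]) (sc + 1)) := by
  intro n
  induction n with
  | zero =>
    intro i lit last splits sc hn hlit
    have hi : ¬ i < cs.length := by omega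
    rw [pvALoop, pvReadOne]
    simp [hi, hlit]
  | succ n ih =>
    intro i lit last splits sc hn hlit
    by_cases hi : i < cs.length
    · rw [pvALoop]
      simp only [hi, dite_true]
      rw [pvStep_eq]
      conv_rhs => rw [pvReadOne]
      rw [if_neg (show ¬ (-lit) = 0 from by omega)]
      simp only [hi, dite_true]
      set lit' := lit - (ar.getD (pvKey cs[i]) 0 - 1) with hlit'
      have hneed : -lit + (ar.getD (pvKey cs[i]) 0 - 1) = -lit' := by omega
      rw [hneed]
      by_cases h0 : lit' = 0
      · have hro : pvReadOne cs ar (i + 1) (-lit') = some (i + 1) := by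
          rw [h0]; simp [pvReadOne]
        rw [if_pos h0, hro]
      · rw [if_neg h0, ih (i + 1) lit' last splits sc (by omega) h0]
    · rw [pvALoop, pvReadOne]
      simp [hi, hlit]

-- A's scan with k+1 arguments still owed is B's loop over k+1 read_one calls
lemma pvALoop_bLoop (cs : List Char) (ar : PySem.Dict String Int) :
    ∀ (k idx : Nat) (splits : List String),
      pvALoop cs ar idx (-1) idx splits (-(k : Int) - 1) = pvBLoop cs ar (k + 1) idx splits := by
  intro k
  induction k with
  | zero =>
    intro idx splits
    rw [show (-((0 : Nat) : Int) - 1) = -1 from by norm_num,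
      pvALoop_readOne cs ar cs.length idx (-1) idx splits (-1) (by omega) (by omega),
      show (- (-1 : Int)) = 1 from by norm_num]
    cases hro : pvReadOne cs ar idx 1 with
    | none => simp [pvBLoop, hro]
    | some e => simp [pvBLoop, hro]
  | succ k ih =>
    intro idx splits
    rw [show (-((k + 1 : Nat) : Int) - 1) = -(k : Int) - 1 - 1 from by push_cast; ring,
      pvALoop_readOne cs ar cs.length idx (-1) idx splits (-(k : Int) - 1 - 1) (by omega)
        (by omega),
      show (- (-1 : Int)) = 1 from by norm_num]
    cases hro : pvReadOne cs ar idx 1 with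
    | none => simp [pvBLoop, hro]
    | some e =>
      show (if -(k : Int) - 1 - 1 + 1 = 0 then
              splits ++ [String.ofList (List.take (e - idx) (List.drop idx cs))] ++
                [String.ofList (List.drop e cs)]
            else
              pvALoop cs ar e (-1) e
                (splits ++ [String.ofList (List.take (e - idx) (List.drop idx cs))])
                (-(k : Int) - 1 - 1 + 1)) =
          pvBLoop cs ar (k + 1 + 1) idx splits
      rw [if_neg (show ¬ (-(k : Int) - 1 - 1 + 1 = 0) from by omega),
        show -(k : Int) - 1 - 1 + 1 = -(k : Int) - 1 from by ring, ih]
      conv_rhs => rw [pvBLoop, hro]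

-- ===== VERDICT (by name: the statement is the Claim_ definition above) =====
theorem split_along_value_spec : Claim_equal_split_along_value := by
  intro polish arity _ hpre
  unfold Spec_split_along_value split_along_value split_along_value_alt
  unfold Pre_split_along_value pvPreB at hpre
  cases hcs : polish.toList with
  | nil => rw [hcs] at hpre; simp at hpre
  | cons c t =>
    rw [hcs] at hpre
    have hpre' : (match (PySem.Dict.mk arity).get? (pvKey c) with
        | none => false
        | some a => pvPreArgs (PySem.Dict.mk arity) a t) = true := hpre
    rw [PySem.List.pyGet?_zero_cons]
    cases ha : (PySem.Dict.mk arity).get? (pvKey c) with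
    | none => rw [ha] at hpre'; simp at hpre'
    | some a =>
    rw [ha] at hpre'
    have hargs : pvPreArgs (PySem.Dict.mk arity) a t = true := hpre'
    unfold pvPreArgs at hargs
    simp only [Bool.or_eq_true, beq_iff_eq, Bool.and_eq_true, decide_eq_true_eq] at hargs
    show (match (PySem.Dict.mk arity).get? (pvKey c) with
          | none => ([] : List String)
          | some a =>
            if -1 * a + 1 = 0 then [String.ofList (List.drop 1 (c :: t))]
            else pvALoop (c :: t) (PySem.Dict.mk arity) 1 (-1) 1 [] (-1 * a + 1)) =
         (match (PySem.Dict.mk arity).get? (pvKey c) with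
          | none => ([] : List String)
          | some a => pvBLoop (c :: t) (PySem.Dict.mk arity) (a - 1).toNat 1 [])
    rw [ha]
    show (if -1 * a + 1 = 0 then [String.ofList (List.drop 1 (c :: t))]
          else pvALoop (c :: t) (PySem.Dict.mk arity) 1 (-1) 1 [] (-1 * a + 1)) =
         pvBLoop (c :: t) (PySem.Dict.mk arity) (a - 1).toNat 1 []
    rcases hargs with h1 | ⟨h2, _⟩
    · subst h1
      norm_num
      simp [pvBLoop]
    · have hne0 : ¬ (-1 * a + 1 = 0) := by omega
      rw [if_neg hne0]
      have hk : (a - 1).toNat = (a - 2).toNat + 1 := by omega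
      have hsc : -1 * a + 1 = -((a - 2).toNat : Int) - 1 := by omega
      rw [hsc, hk, pvALoop_bLoop]
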